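-- pv_equiv track=rewrite | github.com/BhanuHarshaY/GUARD-RAG | tiers/tier3.py | _parse_adjudicator_verdict
-- ===== SOURCE A (Python) =====
-- def _parse_adjudicator_verdict(text):
--     """
--     Parse [APPROVE], [REVISE], or [ABSTAIN] prefix from adjudicator output.
--     Returns (verdict_label, answer_text).
--     Falls back to inferring from content if no prefix present.
--     """
--     text = text.strip()
--     for label in ("APPROVE", "REVISE", "ABSTAIN"):
--         if text.upper().startswith(f"[{label}]"):
--             answer = text[len(f"[{label}]"):].strip()
--             return label, answer
--
--     # fallback inference
--     if "insufficient information" in text.lower():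
--         return "ABSTAIN", text
--     return "REVISE", text
-- ===== SOURCE B (Python) =====
-- def _parse_adjudicator_verdict(text):
--     """Structural parse: extract the bracketed prefix token once, then a set lookup."""
--     t = text.strip()
--     if t[:1] == "[":
--         close = t.find("]")
--         if close != -1:
--             token = t[1:close].upper()
--             if token in ("APPROVE", "REVISE", "ABSTAIN"):
--                 return token, t[close + 1:].strip()
--     if "insufficient information" in t.lower():
--         return "ABSTAIN", t
--     return "REVISE", t
-- ===== Notes on version B (the rewrite author's own statement) =====
-- stated objective: idiomatic
-- what changed: B replaces A's loop of three case-insensitive startswith scans (each re-uppercasing the whole text) by one structural parse of the bracketed prefix: check the leading open bracket, locate the first closing bracket once, uppercase only the token between them and test membership in the label set, then the same content-based fallback.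
import Mathlib
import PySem

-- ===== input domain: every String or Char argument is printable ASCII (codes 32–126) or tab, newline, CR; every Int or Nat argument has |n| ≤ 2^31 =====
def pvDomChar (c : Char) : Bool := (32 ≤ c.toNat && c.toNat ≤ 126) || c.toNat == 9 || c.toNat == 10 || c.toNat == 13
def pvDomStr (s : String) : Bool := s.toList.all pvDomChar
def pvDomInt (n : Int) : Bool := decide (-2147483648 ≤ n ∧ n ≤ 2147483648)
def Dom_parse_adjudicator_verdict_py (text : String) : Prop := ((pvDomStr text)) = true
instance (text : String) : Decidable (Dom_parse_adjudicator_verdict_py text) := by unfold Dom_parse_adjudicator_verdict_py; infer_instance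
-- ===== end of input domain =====

-- B replaces A's three startswith scans over upper(text) by one structural parse of the
-- bracketed prefix (first closing bracket located once, token uppercased, membership test); equal output proved.

-- ===== PORT A =====
-- A's loop over the constant 3-tuple of labels is unrolled into its three iterations in order.
def parse_adjudicator_verdict_py (text : String) : String × String :=
  let t := PySem.Str.strip text
  if PySem.Str.startswith (PySem.Str.upper t) "[APPROVE]" then
    ("APPROVE", PySem.Str.strip (PySem.Str.slice t (some 9) none))
  else if PySem.Str.startswith (PySem.Str.upper t) "[REVISE]" then
    ("REVISE", PySem.Str.strip (PySem.Str.slice t (some 8) none))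
  else if PySem.Str.startswith (PySem.Str.upper t) "[ABSTAIN]" then
    ("ABSTAIN", PySem.Str.strip (PySem.Str.slice t (some 9) none))
  else if PySem.Str.isIn "insufficient information" (PySem.Str.lower t) then
    ("ABSTAIN", t)
  else
    ("REVISE", t)

-- ===== PORT B =====
def parse_adjudicator_verdict_py_alt (text : String) : String × String :=
  let t := PySem.Str.strip text
  let bracket : Option (String × String) :=
    if PySem.Str.slice t none (some 1) = "[" then
      let close := PySem.Str.find t "]"
      if close ≠ -1 then
        let token := PySem.Str.upper (PySem.Str.slice t (some 1) (some close))
        if token = "APPROVE" ∨ token = "REVISE" ∨ token = "ABSTAIN" then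
          some (token, PySem.Str.strip (PySem.Str.slice t (some (close + 1)) none))
        else none
      else none
    else none
  match bracket with
  | some r => r
  | none =>
    if PySem.Str.isIn "insufficient information" (PySem.Str.lower t) then
      ("ABSTAIN", t)
    else
      ("REVISE", t)

-- ===== PRECONDITION & SPEC =====
def Spec_parse_adjudicator_verdict_py (text : String) (out : String × String) : Prop := out = parse_adjudicator_verdict_py_alt text
instance (text : String) (out : String × String) : Decidable (Spec_parse_adjudicator_verdict_py text out) := by unfold Spec_parse_adjudicator_verdict_py; infer_instance

-- ===== CLAIM (what is proved, stated in full; the proofs are below) =====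
def Claim_equal_parse_adjudicator_verdict_py : Prop := ∀ (text : String), Dom_parse_adjudicator_verdict_py text → Spec_parse_adjudicator_verdict_py text (parse_adjudicator_verdict_py text)

-- ===== LEMMAS AND PROOFS =====

-- upperChar fixes '[' : nothing else is mapped to it
theorem upperChar_eq_lbracket {c : Char} (h : PySem.Chars.upperChar c = '[') : c = '[' := by
  by_cases hc : PySem.Chars.islower c = true
  · exfalso
    have h97 : 97 ≤ c.toNat ∧ c.toNat ≤ 122 := by
      have h1 : 'a' ≤ c ∧ c ≤ 'z' := by simpa [PySem.Chars.islower] using hc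
      simpa [Char.le_def, UInt32.le_iff_toNat_le] using h1
    have hv : (c.toNat - 32).isValidChar := Or.inl (by omega)
    have ht := congrArg Char.toNat h
    simp only [PySem.Chars.upperChar, hc, if_true] at ht
    rw [Char.toNat_ofNat, if_pos hv] at ht
    have h91 : ('[' : Char).toNat = 91 := rfl
    omega
  · rw [PySem.Chars.upperChar, if_neg hc] at h; exact h

-- upperChar fixes ']' : nothing else is mapped to it
theorem upperChar_eq_rbracket {c : Char} (h : PySem.Chars.upperChar c = ']') : c = ']' := by
  by_cases hc : PySem.Chars.islower c = true
  · exfalso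
    have h97 : 97 ≤ c.toNat ∧ c.toNat ≤ 122 := by
      have h1 : 'a' ≤ c ∧ c ≤ 'z' := by simpa [PySem.Chars.islower] using hc
      simpa [Char.le_def, UInt32.le_iff_toNat_le] using h1
    have hv : (c.toNat - 32).isValidChar := Or.inl (by omega)
    have ht := congrArg Char.toNat h
    simp only [PySem.Chars.upperChar, hc, if_true] at ht
    rw [Char.toNat_ofNat, if_pos hv] at ht
    have h93 : (']' : Char).toNat = 93 := rfl
    omega
  · rw [PySem.Chars.upperChar, if_neg hc] at h; exact h

-- the first ']' of pre ++ ']' :: suf (']' ∉ pre) sits at index pre.length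
theorem find_rbracket_append (pre suf : List Char) (h : ']' ∉ pre) :
    PySem.Chars.find (pre ++ ']' :: suf) [']'] = (pre.length : Int) := by
  have hinf : [']'] <:+: (pre ++ ']' :: suf) := ⟨pre, suf, by simp⟩
  have h0 : 0 ≤ PySem.Chars.find (pre ++ ']' :: suf) [']'] :=
    (PySem.Chars.find_nonneg_iff _ _).2 hinf
  obtain ⟨hpre, hmin⟩ := PySem.Chars.find_spec h0
  set k := (PySem.Chars.find (pre ++ ']' :: suf) [']']).toNat with hk
  have hk_le : k ≤ pre.length := by
    by_contra hlt
    exact absurd (by simp : [']'] <+: List.drop pre.length (pre ++ ']' :: suf))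
        (hmin pre.length (by omega))
  have hk_ge : pre.length ≤ k := by
    by_contra hlt
    obtain ⟨tl, htl⟩ := hpre
    have hget : (pre ++ ']' :: suf)[k]? = some ']' := by
      have hh : ((pre ++ ']' :: suf).drop k)[0]? = some ']' := by
        rw [← htl]; rfl
      simpa [List.getElem?_drop] using hh
    rw [List.getElem?_append_left (by omega)] at hget
    exact h (List.mem_of_getElem? hget)
  omega

-- forward: the upper-cased text starts with "[LAB]" ⇒ B's structural parse sees exactly that
theorem fwd_core (cs lab : List Char) (hlab : ']' ∉ lab)
    (h : ('[' :: lab ++ [']']) <+: PySem.Chars.upper cs) :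
    cs.take 1 = ['['] ∧
    PySem.Chars.find cs [']'] = ((lab.length : Int) + 1) ∧
    PySem.Chars.upper ((cs.drop 1).take lab.length) = lab := by
  obtain ⟨rest, hrest⟩ := h
  have hmap : List.map PySem.Chars.upperChar cs = '[' :: (lab ++ ']' :: rest) := by
    have hh : List.map PySem.Chars.upperChar cs = ('[' :: lab ++ [']']) ++ rest := by
      simpa [PySem.Chars.upper] using hrest.symm
    simpa using hh
  rw [List.map_eq_cons_iff] at hmap
  obtain ⟨a, as, rfl, ha, hmap⟩ := hmap
  rw [List.map_eq_append_iff] at hmap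
  obtain ⟨m1, m2, rfl, hm1, hm2⟩ := hmap
  rw [List.map_eq_cons_iff] at hm2
  obtain ⟨b, m2', rfl, hb, hm2'⟩ := hm2
  have ha' : a = '[' := upperChar_eq_lbracket ha
  have hb' : b = ']' := upperChar_eq_rbracket hb
  subst ha'; subst hb'
  have hm1len : m1.length = lab.length := by
    have hh := congrArg List.length hm1; simpa using hh
  have hm1no : ']' ∉ m1 := by
    intro hmem
    have hh : PySem.Chars.upperChar ']' ∈ List.map PySem.Chars.upperChar m1 :=
      List.mem_map_of_mem hmem
    rw [hm1] at hh
    have hfix : PySem.Chars.upperChar ']' = ']' := by decide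
    rw [hfix] at hh
    exact hlab hh
  refine ⟨rfl, ?_, ?_⟩
  · have hassoc : ('[' :: m1) ++ ']' :: m2' = '[' :: (m1 ++ ']' :: m2') := by simp
    rw [← hassoc, find_rbracket_append ('[' :: m1) m2' (by simp [hm1no])]
    simp [hm1len]
  · have hdrop : (('[' :: (m1 ++ ']' :: m2')).drop 1) = m1 ++ ']' :: m2' := rfl
    rw [hdrop, ← hm1len, List.take_left]
    simpa [PySem.Chars.upper] using hm1

-- backward: B's structural parse succeeded with token lab ⇒ upper-cased text starts with "[LAB]"
theorem bwd_core (cs lab : List Char) (close : Int)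
    (h1 : cs.take 1 = ['['])
    (h0 : 0 ≤ close)
    (hf : PySem.Chars.find cs [']'] = close)
    (htok : PySem.Chars.upper (PySem.List.slice cs (some 1) (some close)) = lab) :
    ('[' :: lab ++ [']']) <+: PySem.Chars.upper cs := by
  have h0' : 0 ≤ PySem.Chars.find cs [']'] := by rw [hf]; exact h0
  obtain ⟨hpre, hmin⟩ := PySem.Chars.find_spec h0'
  set k := (PySem.Chars.find cs [']']).toNat with hk
  obtain ⟨r, hr0⟩ := hpre
  have hr : cs.drop k = ']' :: r := by simpa using hr0.symm
  have hkl : k < cs.length := by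
    rcases Nat.lt_or_ge k cs.length with hlt | hge
    · exact hlt
    · exfalso
      rw [List.drop_eq_nil_iff.2 hge] at hr
      exact (List.cons_ne_nil ']' r) hr.symm
  have hk1 : 1 ≤ k := by
    rcases Nat.eq_zero_or_pos k with hz | hp
    · exfalso
      rw [hz, List.drop_zero] at hr
      rw [hr] at h1
      simp at h1
    · exact hp
  have hclose : close.toNat = k := by rw [← hf]
  have hslice : PySem.List.slice cs (some 1) (some close) = (cs.drop 1).take (k - 1) := by
    rw [PySem.List.slice_toNat cs (by norm_num) h0, hclose]
    norm_num
  have e3 : (cs.drop 1).drop (k - 1) = cs.drop k := by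
    rw [List.drop_drop]
    congr 1
    omega
  have e2 : cs.drop 1 = (cs.drop 1).take (k - 1) ++ ']' :: r := by
    conv_lhs => rw [← List.take_append_drop (k - 1) (cs.drop 1)]
    rw [e3, hr]
  have e1 : cs = ['['] ++ cs.drop 1 := by
    have e0 := (List.take_append_drop 1 cs).symm
    rw [h1] at e0
    exact e0
  have hdecomp : cs = '[' :: ((cs.drop 1).take (k - 1) ++ ']' :: r) :=
    calc cs = ['['] ++ cs.drop 1 := e1
      _ = ['['] ++ ((cs.drop 1).take (k - 1) ++ ']' :: r) := by rw [← e2]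
      _ = '[' :: ((cs.drop 1).take (k - 1) ++ ']' :: r) := rfl
  rw [hslice] at htok
  have htok' : List.map PySem.Chars.upperChar ((cs.drop 1).take (k - 1)) = lab := by
    simpa [PySem.Chars.upper] using htok
  refine ⟨List.map PySem.Chars.upperChar r, ?_⟩
  conv_rhs => rw [hdecomp]
  have hu1 : PySem.Chars.upperChar '[' = '[' := by decide
  have hu2 : PySem.Chars.upperChar ']' = ']' := by decide
  simp only [PySem.Chars.upper, List.map_cons, List.map_append, hu1, hu2, htok']
  simp

-- String-level per-label corollaries (forward)
theorem fwd_approve (t : String)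
    (h : PySem.Chars.startswith (PySem.Chars.upper t.toList)
      ('[' :: "APPROVE".toList ++ [']']) = true) :
    PySem.Str.slice t none (some 1) = "[" ∧
    PySem.Chars.find t.toList [']'] = 8 ∧
    PySem.Str.upper (PySem.Str.slice t (some 1) (some 8)) = "APPROVE" := by
  obtain ⟨c1, c2, c3⟩ := fwd_core t.toList "APPROVE".toList (by decide)
    ((PySem.Chars.startswith_iff _ _).1 h)
  refine ⟨?_, ?_, ?_⟩
  · rw [show PySem.Str.slice t none (some 1) =
        String.ofList (PySem.Chars.slice t.toList none (some 1)) from rfl,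
      PySem.Chars.slice_eq_listSlice, PySem.List.slice_to t.toList (by norm_num),
      show ((1 : Int).toNat) = 1 from rfl, c1]
  · simpa using c2
  · rw [show PySem.Str.upper (PySem.Str.slice t (some 1) (some 8)) =
        String.ofList (PySem.Chars.upper (PySem.Chars.slice t.toList (some 1) (some 8))) from by
      simp [PySem.Str.upper, PySem.Str.slice],
      PySem.Chars.slice_eq_listSlice, PySem.List.slice_toNat t.toList (by norm_num) (by norm_num),
      show ((8 : Int).toNat - (1 : Int).toNat) = "APPROVE".toList.length from rfl,
      show ((1 : Int).toNat) = 1 from rfl, c3]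
    exact String.ofList_toList

theorem fwd_revise (t : String)
    (h : PySem.Chars.startswith (PySem.Chars.upper t.toList)
      ('[' :: "REVISE".toList ++ [']']) = true) :
    PySem.Str.slice t none (some 1) = "[" ∧
    PySem.Chars.find t.toList [']'] = 7 ∧
    PySem.Str.upper (PySem.Str.slice t (some 1) (some 7)) = "REVISE" := by
  obtain ⟨c1, c2, c3⟩ := fwd_core t.toList "REVISE".toList (by decide)
    ((PySem.Chars.startswith_iff _ _).1 h)
  refine ⟨?_, ?_, ?_⟩
  · rw [show PySem.Str.slice t none (some 1) =
        String.ofList (PySem.Chars.slice t.toList none (some 1)) from rfl,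
      PySem.Chars.slice_eq_listSlice, PySem.List.slice_to t.toList (by norm_num),
      show ((1 : Int).toNat) = 1 from rfl, c1]
  · simpa using c2
  · rw [show PySem.Str.upper (PySem.Str.slice t (some 1) (some 7)) =
        String.ofList (PySem.Chars.upper (PySem.Chars.slice t.toList (some 1) (some 7))) from by
      simp [PySem.Str.upper, PySem.Str.slice],
      PySem.Chars.slice_eq_listSlice, PySem.List.slice_toNat t.toList (by norm_num) (by norm_num),
      show ((7 : Int).toNat - (1 : Int).toNat) = "REVISE".toList.length from rfl,
      show ((1 : Int).toNat) = 1 from rfl, c3]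
    exact String.ofList_toList

theorem fwd_abstain (t : String)
    (h : PySem.Chars.startswith (PySem.Chars.upper t.toList)
      ('[' :: "ABSTAIN".toList ++ [']']) = true) :
    PySem.Str.slice t none (some 1) = "[" ∧
    PySem.Chars.find t.toList [']'] = 8 ∧
    PySem.Str.upper (PySem.Str.slice t (some 1) (some 8)) = "ABSTAIN" := by
  obtain ⟨c1, c2, c3⟩ := fwd_core t.toList "ABSTAIN".toList (by decide)
    ((PySem.Chars.startswith_iff _ _).1 h)
  refine ⟨?_, ?_, ?_⟩
  · rw [show PySem.Str.slice t none (some 1) =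
        String.ofList (PySem.Chars.slice t.toList none (some 1)) from rfl,
      PySem.Chars.slice_eq_listSlice, PySem.List.slice_to t.toList (by norm_num),
      show ((1 : Int).toNat) = 1 from rfl, c1]
  · simpa using c2
  · rw [show PySem.Str.upper (PySem.Str.slice t (some 1) (some 8)) =
        String.ofList (PySem.Chars.upper (PySem.Chars.slice t.toList (some 1) (some 8))) from by
      simp [PySem.Str.upper, PySem.Str.slice],
      PySem.Chars.slice_eq_listSlice, PySem.List.slice_toNat t.toList (by norm_num) (by norm_num),
      show ((8 : Int).toNat - (1 : Int).toNat) = "ABSTAIN".toList.length from rfl,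
      show ((1 : Int).toNat) = 1 from rfl, c3]
    exact String.ofList_toList

-- String-level backward corollary, for any label string
theorem bwd_str (t lab : String)
    (h1 : PySem.Str.slice t none (some 1) = "[")
    (h0 : 0 ≤ PySem.Chars.find t.toList [']'])
    (htok : PySem.Str.upper (PySem.Str.slice t (some 1) (some (PySem.Chars.find t.toList [']']))) = lab) :
    PySem.Chars.startswith (PySem.Chars.upper t.toList) ('[' :: lab.toList ++ [']']) = true := by
  have h1' : t.toList.take 1 = ['['] := by
    have hh := congrArg String.toList h1
    rw [show (PySem.Str.slice t none (some 1)).toList =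
        PySem.Chars.slice t.toList none (some 1) from by
      simp [PySem.Str.slice, String.toList_ofList],
      PySem.Chars.slice_eq_listSlice, PySem.List.slice_to t.toList (by norm_num)] at hh
    simpa using hh
  have htok' : PySem.Chars.upper (PySem.List.slice t.toList (some 1)
      (some (PySem.Chars.find t.toList [']']))) = lab.toList := by
    have hh := congrArg String.toList htok
    rw [show (PySem.Str.upper (PySem.Str.slice t (some 1) (some (PySem.Chars.find t.toList [']'])))).toList
        = PySem.Chars.upper (PySem.Chars.slice t.toList (some 1) (some (PySem.Chars.find t.toList [']']))) from by
      simp [PySem.Str.upper, PySem.Str.slice, String.toList_ofList],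
      PySem.Chars.slice_eq_listSlice] at hh
    exact hh
  exact (PySem.Chars.startswith_iff _ _).2
    (bwd_core t.toList lab.toList (PySem.Chars.find t.toList [']']) h1' h0 rfl htok')

-- ===== VERDICT (by name: the statement is the Claim_ definition above) =====
theorem parse_adjudicator_verdict_py_spec : Claim_equal_parse_adjudicator_verdict_py := by
  intro text _
  unfold Spec_parse_adjudicator_verdict_py
  unfold parse_adjudicator_verdict_py parse_adjudicator_verdict_py_alt
  generalize PySem.Str.strip text = t
  by_cases h1 : PySem.Chars.startswith (PySem.Chars.upper t.toList)
      ['[', 'A', 'P', 'P', 'R', 'O', 'V', 'E', ']'] = true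
  · obtain ⟨c1, c2, c3⟩ := fwd_approve t (by simpa using h1)
    simp [h1, c1, c2, c3]
  · by_cases h2 : PySem.Chars.startswith (PySem.Chars.upper t.toList)
        ['[', 'R', 'E', 'V', 'I', 'S', 'E', ']'] = true
    · obtain ⟨c1, c2, c3⟩ := fwd_revise t (by simpa using h2)
      simp [h1, h2, c1, c2, c3]
    · by_cases h3 : PySem.Chars.startswith (PySem.Chars.upper t.toList)
          ['[', 'A', 'B', 'S', 'T', 'A', 'I', 'N', ']'] = true
      · obtain ⟨c1, c2, c3⟩ := fwd_abstain t (by simpa using h3)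
        simp [h1, h2, h3, c1, c2, c3]
      · by_cases hb1 : PySem.Str.slice t none (some 1) = "["
        · by_cases hb2 : PySem.Chars.find t.toList [']'] = -1
          · simp [h1, h2, h3, hb1, hb2]
          · have h0 : 0 ≤ PySem.Chars.find t.toList [']'] := by
              have hge := PySem.Chars.neg_one_le_find t.toList [']']
              omega
            by_cases ha : PySem.Str.upper (PySem.Str.slice t (some 1)
                (some (PySem.Chars.find t.toList [']']))) = "APPROVE"
            · exact absurd (by simpa using bwd_str t "APPROVE" hb1 h0 ha) h1
            · by_cases hr : PySem.Str.upper (PySem.Str.slice t (some 1)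
                  (some (PySem.Chars.find t.toList [']']))) = "REVISE"
              · exact absurd (by simpa using bwd_str t "REVISE" hb1 h0 hr) h2
              · by_cases hab : PySem.Str.upper (PySem.Str.slice t (some 1)
                    (some (PySem.Chars.find t.toList [']']))) = "ABSTAIN"
                · exact absurd (by simpa using bwd_str t "ABSTAIN" hb1 h0 hab) h3
                · simp [h1, h2, h3, hb1, hb2, ha, hr, hab]
        · simp [h1, h2, h3, hb1]
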